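-- pv_equiv track=rewrite | github.com/loning/mbook-binary | src/binaryuniverse/tests/test_T9_2.py | _generate_irreducible_pattern
-- ===== SOURCE A (Python) =====
-- def _generate_irreducible_pattern(processed: str) -> str:
--     """生成不可还原的模式"""
--     if len(processed) < 3:
--         return processed
--
--     # 使用非线性变换
--     quale = []
--
--     for i in range(len(processed)):
--         # 考虑局部上下文
--         context_start = max(0, i - 2)
--         context_end = min(len(processed), i + 3)
--         context = processed[context_start:context_end]
--
--         # 基于上下文生成感质位
--         if context.count('1') > len(context) / 2:
--             quale.append('0' if i % 2 == 0 else '1')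
--         else:
--             quale.append('1' if i % 3 == 0 else '0')
--
--     result = ''.join(quale)
--     return result.replace("11", "101")
-- ===== SOURCE B (Python) =====
-- def _generate_irreducible_pattern(processed: str) -> str:
--     """Scatter/difference-array re-implementation: each '1' at position j casts a
--     +1/-1 vote at its influence-window boundaries; a running accumulator then
--     recovers every local one-count, and the final 11->101 rewrite is done by an
--     explicit left-to-right scanner instead of str.replace."""
--     n = len(processed)
--     if n < 3:
--         return processed
--
--     # scatter pass: '1' at j influences positions max(0, j-2) .. min(n, j+3)-1
--     diff = [0] * (n + 1)
--     for j, c in enumerate(processed):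
--         if c == '1':
--             diff[max(0, j - 2)] += 1
--             diff[min(n, j + 3)] -= 1
--
--     # gather pass: running sum of the votes is the window one-count at i
--     out = []
--     running = 0
--     for i in range(n):
--         running += diff[i]
--         length = min(n, i + 3) - max(0, i - 2)
--         if running > length / 2:
--             out.append('0' if i % 2 == 0 else '1')
--         else:
--             out.append('1' if i % 3 == 0 else '0')
--     q = ''.join(out)
--
--     # explicit non-overlapping left-to-right rewrite of "11" into "101"
--     res = []
--     i = 0
--     while i < len(q):
--         if q[i:i + 2] == "11":
--             res.append("101")
--             i += 2
--         else:
--             res.append(q[i])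
--             i += 1
--     return ''.join(res)
-- ===== Notes on version B (the rewrite author's own statement) =====
-- stated objective: alternative
-- what changed: B inverts A's gather into its scatter dual: instead of slicing out and re-counting each 5-char context, every set bit casts +1/-1 votes at its influence-window boundaries into a difference array and a single running accumulator recovers each local count; the final doubled-bit rewrite is an explicit left-to-right two-character scanner instead of str.replace.
import Mathlib
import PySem

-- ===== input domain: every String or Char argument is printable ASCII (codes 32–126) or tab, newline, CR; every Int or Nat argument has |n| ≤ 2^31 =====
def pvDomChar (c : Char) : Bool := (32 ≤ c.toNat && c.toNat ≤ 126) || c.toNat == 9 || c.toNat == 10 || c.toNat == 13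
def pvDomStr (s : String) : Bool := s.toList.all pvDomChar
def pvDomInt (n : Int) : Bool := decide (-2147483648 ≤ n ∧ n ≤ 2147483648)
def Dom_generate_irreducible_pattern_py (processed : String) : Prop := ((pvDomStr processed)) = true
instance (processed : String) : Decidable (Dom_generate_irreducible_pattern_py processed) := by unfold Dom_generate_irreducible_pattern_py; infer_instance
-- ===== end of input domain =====

-- B replaces A's gather (slice out and count each 5-char context) by its scatter dual: every '1'
-- casts ±1 votes at its influence-window boundaries and one running accumulator recovers each
-- local count; the final "11"->"101" rewrite is an explicit left-to-right scanner, not str.replace.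
-- (objective: alternative algorithm of the same cost; same return values everywhere)

-- ===== PORT A =====
-- 'context.count("1") > len(context)/2' compares an int with an exact float len/2: exact ⟺ 2*count > len.
def generate_irreducible_pattern_py (processed : String) : String :=
  let cs := processed.toList
  if cs.length < 3 then processed
  else
    let quale := (PySem.List.pyRange 0 (cs.length : Int) 1).foldl (fun acc i =>
      let contextStart := max 0 (i - 2)
      let contextEnd := min (cs.length : Int) (i + 3)
      let context := PySem.List.slice cs (some contextStart) (some contextEnd)
      if 2 * (context.count '1' : Int) > (context.length : Int) then
        acc ++ [if PySem.Int.mod i 2 = 0 then '0' else '1']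
      else
        acc ++ [if PySem.Int.mod i 3 = 0 then '1' else '0']) []
    -- ''.join of singleton strings is the char list itself; then replace("11","101")
    String.ofList (PySem.Chars.replace quale ['1', '1'] ['1', '0', '1'])

-- ===== PORT B =====
-- port of Source B's while-loop scanner (index scan = structural recursion on the rest of the list):
-- q[i:i+2] == "11" tests the next two characters; on a match emit "101" and skip both.
def pvRewrite11 : List Char → List Char
  | [] => []
  | [c] => [c]
  | c :: d :: t =>
      if c = '1' ∧ d = '1' then '1' :: '0' :: '1' :: pvRewrite11 t
      else c :: pvRewrite11 (d :: t)

-- 'running > length/2' on ints, exact as 2*running > length (same test as A's).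
def generate_irreducible_pattern_py_alt (processed : String) : String :=
  let cs := processed.toList
  let n := cs.length
  if n < 3 then processed
  else
    -- scatter pass: diff[max(0,j-2)] += 1; diff[min(n,j+3)] -= 1 for each '1' at j
    let diff := (PySem.List.enumerate cs).foldl (fun d jc =>
      if jc.2 = '1' then
        let a := (max 0 (jc.1 - 2)).toNat
        let b := (min (n : Int) (jc.1 + 3)).toNat
        let d1 := d.set a (d.getD a 0 + 1)
        d1.set b (d1.getD b 0 - 1)
      else d) (List.replicate (n + 1) (0 : Int))
    -- gather pass: running sum of the votes is the window one-count at i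
    let q := ((List.range n).foldl (fun (st : Int × List Char) (i : Nat) =>
      let running := st.1 + diff.getD i 0
      let len := min n (i + 3) - max 0 (i - 2)
      let ch := if 2 * running > (len : Int) then (if i % 2 = 0 then '0' else '1')
                else (if i % 3 = 0 then '1' else '0')
      (running, st.2 ++ [ch])) ((0 : Int), [])).2
    String.ofList (pvRewrite11 q)

-- ===== PRECONDITION & SPEC =====
def Spec_generate_irreducible_pattern_py (processed : String) (out : String) : Prop := out = generate_irreducible_pattern_py_alt processed
instance (processed : String) (out : String) : Decidable (Spec_generate_irreducible_pattern_py processed out) := by unfold Spec_generate_irreducible_pattern_py; infer_instance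

-- ===== CLAIM (what is proved, stated in full; the proofs are below) =====
def Claim_equal_generate_irreducible_pattern_py : Prop := ∀ (processed : String), Dom_generate_irreducible_pattern_py processed → Spec_generate_irreducible_pattern_py processed (generate_irreducible_pattern_py processed)

-- ===== LEMMAS AND PROOFS =====

-- B's manual scanner is Python's replace("11","101") (non-overlapping, left to right).
lemma rewrite11_go_eq (fuel : Nat) (l acc : List Char) (h : l.length ≤ fuel) :
    PySem.Chars.replace.go ['1','1'] ['1','0','1'] fuel l acc = acc.reverse ++ pvRewrite11 l := by
  induction fuel generalizing l acc with
  | zero =>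
      have : l = [] := List.eq_nil_of_length_eq_zero (Nat.le_zero.mp h)
      subst this
      simp [PySem.Chars.replace.go, pvRewrite11]
  | succ f ih =>
      match l with
      | [] => simp [PySem.Chars.replace.go, pvRewrite11]
      | [c] =>
        rw [PySem.Chars.replace.go]
        have hp : List.isPrefixOf ['1','1'] [c] = false := by simp [List.isPrefixOf]
        rw [hp]
        simp only [Bool.false_eq_true, if_false]
        rw [ih [] (c :: acc) (by simp)]
        simp [pvRewrite11]
      | c :: d :: t =>
        rw [PySem.Chars.replace.go]
        by_cases h1 : c = '1' ∧ d = '1'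
        · obtain ⟨rfl, rfl⟩ := h1
          have hp : List.isPrefixOf ['1','1'] ('1' :: '1' :: t) = true := by simp [List.isPrefixOf]
          rw [hp]
          simp only [if_true]
          rw [ih _ _ (by simp at h ⊢; omega)]
          simp [pvRewrite11]
        · have hp : List.isPrefixOf ['1','1'] (c :: d :: t) = false := by
            simp [List.isPrefixOf]; tauto
          rw [hp]
          simp only [Bool.false_eq_true, if_false]
          rw [ih _ _ (by simp at h ⊢; omega)]
          rw [pvRewrite11, if_neg h1]
          simp

lemma replace_eq_rewrite11 (l : List Char) :
    PySem.Chars.replace l ['1','1'] ['1','0','1'] = pvRewrite11 l := by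
  rw [PySem.Chars.replace]
  simp [List.isEmpty]
  exact rewrite11_go_eq l.length l [] le_rfl

-- proof-side abbreviations
def pvOne (cs : List Char) (j : Nat) : Bool := cs.getD j ' ' == '1'
def pvCnt (cs : List Char) (m : Nat) : Int := ((cs.take m).count '1' : Int)
def pvIncP (cs : List Char) (m k : Nat) : Int :=
  ((List.range m).countP (fun j => pvOne cs j && (j - 2 == k)) : Int)
def pvDecP (cs : List Char) (n m k : Nat) : Int :=
  ((List.range m).countP (fun j => pvOne cs j && (min n (j + 3) == k)) : Int)
def pvE (cs : List Char) (n m k : Nat) : Int := pvIncP cs m k - pvDecP cs n m k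
def pvS (cs : List Char) (n t : Nat) : Int := ((List.range t).map (pvE cs n n)).sum

lemma set_map_range (f : Nat → Int) (N k : Nat) (v : Int) :
    ((List.range N).map f).set k v = (List.range N).map (fun x => if x = k then v else f x) := by
  apply List.ext_getElem
  · simp
  · intro i h1 h2
    simp only [List.getElem_set, List.getElem_map, List.getElem_range] at *
    by_cases hik : k = i
    · subst hik; simp
    · rw [if_neg hik, if_neg (fun h => hik h.symm)]

-- the scatter loop's result, characterised pointwise
lemma scatter_inv (cs : List Char) (n : Nat) (hn : n = cs.length) (m : Nat) (hm : m ≤ n) :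
    (List.range m).foldl (fun d j =>
        if cs.getD j ' ' = '1' then
          let a := j - 2
          let b := min n (j + 3)
          let d1 := d.set a (d.getD a 0 + 1)
          d1.set b (d1.getD b 0 - 1)
        else d) (List.replicate (n + 1) (0 : Int))
      = (List.range (n + 1)).map (pvE cs n m) := by
  induction m with
  | zero =>
      have : pvE cs n 0 = fun _ => (0 : Int) := by
        funext k; simp [pvE, pvIncP, pvDecP]
      rw [this]
      apply List.ext_getElem <;> simp
  | succ m ih =>
      have hm' : m < n := hm
      rw [List.range_succ, List.foldl_append, ih (le_of_lt hm'), List.foldl_cons, List.foldl_nil]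
      have ha : m - 2 < n + 1 := by omega
      have hb : min n (m + 3) < n + 1 := by omega
      have hab : m - 2 ≠ min n (m + 3) := by omega
      have hstep : ∀ k, pvE cs n (m + 1) k
          = pvE cs n m k
            + (if pvOne cs m then ((if m - 2 = k then 1 else 0) - (if min n (m + 3) = k then 1 else 0)) else 0) := by
        intro k
        simp only [pvE, pvIncP, pvDecP, List.range_succ, List.countP_append, List.countP_singleton]
        by_cases ho : pvOne cs m = true
        · simp only [ho, Bool.true_and, if_true]
          by_cases h1 : m - 2 = k <;> by_cases h2 : min n (m + 3) = k <;>
            simp [h1, h2] <;> push_cast <;> ring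
        · simp only [Bool.not_eq_true] at ho
          simp [ho]
      by_cases ho : cs.getD m ' ' = '1'
      · have hone : pvOne cs m = true := by unfold pvOne; rw [ho]; rfl
        rw [if_pos ho]
        simp only []
        have hget1 : ((List.range (n + 1)).map (pvE cs n m)).getD (m - 2) 0 = pvE cs n m (m - 2) := by
          rw [List.getD_eq_getElem?_getD]
          simp [List.getElem?_map, List.getElem?_range, ha]
        rw [hget1, set_map_range]
        have hget2 : ((List.range (n + 1)).map (fun x => if x = m - 2 then pvE cs n m (m - 2) + 1 else pvE cs n m x)).getD (min n (m + 3)) 0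
            = pvE cs n m (min n (m + 3)) := by
          rw [List.getD_eq_getElem?_getD]
          simp [List.getElem?_map, List.getElem?_range, hb, Ne.symm hab]
        rw [hget2, set_map_range]
        apply List.map_congr_left
        intro x _
        rw [hstep x]
        simp only [hone, if_true]
        split_ifs <;> first | omega | (subst_vars; push_cast; ring) | (exfalso; omega)
      · have hone : pvOne cs m = false := by unfold pvOne; exact beq_eq_false_iff_ne.mpr ho
        rw [if_neg ho]
        apply List.map_congr_left
        intro x _
        rw [hstep x]
        simp [hone]

lemma sum_ind (v t : Nat) :
    (((List.range t).map (fun x => if v = x then (1 : Int) else 0)).sum)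
      = if v < t then 1 else 0 := by
  induction t with
  | zero => simp
  | succ t ih =>
      rw [List.range_succ, List.map_append, List.sum_append, ih]
      by_cases h : v = t
      · subst h; simp
      · have : (v < t + 1) ↔ (v < t) := by omega
        simp [h, this]

lemma sum_countP (l : List Nat) (q : Nat → Bool) (f : Nat → Nat) (t : Nat) :
    ((List.range t).map (fun x => ((l.countP (fun j => q j && (f j == x))) : Int))).sum
      = (l.countP (fun j => q j && decide (f j < t)) : Int) := by
  induction l with
  | nil => simp
  | cons j l ih =>
      have hmap : ((List.range t).map (fun x => (((j :: l).countP (fun j => q j && (f j == x))) : Int)))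
          = (List.range t).map (fun x => ((l.countP (fun j => q j && (f j == x))) : Int)
              + (if q j && (f j == x) then 1 else 0)) := by
        apply List.map_congr_left
        intro x _
        rw [List.countP_cons]
        push_cast
        split <;> simp
      rw [hmap, List.sum_map_add, ih, List.countP_cons]
      by_cases hq : q j = true
      · simp only [hq, Bool.true_and]
        have : ((List.range t).map (fun x => if (f j == x) = true then (1:Int) else 0)).sum
            = if f j < t then 1 else 0 := by
          rw [← sum_ind (f j) t]
          apply congrArg
          apply List.map_congr_left
          intro x _
          by_cases h : f j = x <;> simp [h]
        rw [this]
        split <;> simp_all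
      · simp only [Bool.not_eq_true] at hq
        simp [hq]

lemma countP_range_lt (p : Nat → Bool) (e n : Nat) (he : e ≤ n) :
    (List.range n).countP (fun j => p j && decide (j < e)) = (List.range e).countP p := by
  obtain ⟨d, rfl⟩ := Nat.exists_eq_add_of_le he
  rw [List.range_add, List.countP_append]
  have h1 : (List.range e).countP (fun j => p j && decide (j < e)) = (List.range e).countP p := by
    apply List.countP_congr
    intro j hj
    simp [List.mem_range.mp hj]
  have h2 : ((List.range d).map (e + ·)).countP (fun j => p j && decide (j < e)) = 0 := by
    rw [List.countP_eq_zero]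
    intro j hj
    simp only [List.mem_map] at hj
    obtain ⟨x, _, rfl⟩ := hj
    simp [Nat.not_lt.mpr (Nat.le_add_right e x)]
  rw [h1, h2]
  omega

lemma countP_range_take (cs : List Char) (e : Nat) (he : e ≤ cs.length) :
    (List.range e).countP (pvOne cs) = (cs.take e).count '1' := by
  induction e with
  | zero => simp
  | succ e ih =>
      have he' : e < cs.length := he
      rw [List.range_succ, List.countP_append, ih (le_of_lt he')]
      rw [List.take_add_one]
      simp only [List.count_append, List.countP_singleton]
      rw [List.getElem?_eq_getElem he']
      have : pvOne cs e = (cs[e] == '1') := by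
        simp [pvOne, List.getD, List.getElem?_eq_getElem he']
      rw [this]
      by_cases h : cs[e] = '1' <;> simp [h, List.count_cons]

-- partial sums of the vote table are the window one-counts
lemma S_eq_window (cs : List Char) (n : Nat) (hn : n = cs.length) (i : Nat) (hi : i < n) :
    pvS cs n (i + 1) = pvCnt cs (min n (i + 3)) - pvCnt cs (i - 2) := by
  have hsplit : pvS cs n (i + 1)
      = ((List.range (i+1)).map (fun k => pvIncP cs n k)).sum
        - ((List.range (i+1)).map (fun k => pvDecP cs n n k)).sum := by
    unfold pvS pvE
    induction (List.range (i+1)) with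
    | nil => simp
    | cons a l ihl => simp [List.map_cons, List.sum_cons, ihl]; ring
  rw [hsplit]
  unfold pvIncP pvDecP
  rw [sum_countP (List.range n) (pvOne cs) (fun j => j - 2) (i+1),
      sum_countP (List.range n) (pvOne cs) (fun j => min n (j + 3)) (i+1)]
  have hinc : (List.range n).countP (fun j => pvOne cs j && decide (j - 2 < i + 1))
      = (List.range n).countP (fun j => pvOne cs j && decide (j < min n (i + 3))) := by
    apply List.countP_congr
    intro j hj
    have := List.mem_range.mp hj
    have hd : decide (j - 2 < i + 1) = decide (j < min n (i + 3)) := by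
      rw [decide_eq_decide]; omega
    rw [hd]
  have hdec : (List.range n).countP (fun j => pvOne cs j && decide (min n (j + 3) < i + 1))
      = (List.range n).countP (fun j => pvOne cs j && decide (j < i - 2)) := by
    apply List.countP_congr
    intro j hj
    have := List.mem_range.mp hj
    have hd : decide (min n (j + 3) < i + 1) = decide (j < i - 2) := by
      rw [decide_eq_decide]; omega
    rw [hd]
  rw [hinc, hdec, countP_range_lt _ _ _ (by omega), countP_range_lt _ _ _ (by omega),
      countP_range_take cs _ (by omega), countP_range_take cs _ (by omega)]
  rfl

-- B's gather pass: the running accumulator carries pvS, each emitted bit uses the window count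
lemma gather_inv (cs : List Char) (n : Nat) (hn : n = cs.length) (D : List Int)
    (hD : ∀ i, i < n → D.getD i 0 = pvE cs n n i) (m : Nat) (hm : m ≤ n) :
    (List.range m).foldl (fun (st : Int × List Char) (i : Nat) =>
        (st.1 + D.getD i 0,
         st.2 ++ [if 2 * (st.1 + D.getD i 0) > ((min n (i + 3) - max 0 (i - 2) : Nat) : Int)
                  then (if i % 2 = 0 then '0' else '1') else (if i % 3 = 0 then '1' else '0')]))
      ((0 : Int), [])
      = (pvS cs n m, (List.range m).map (fun i =>
          if 2 * (pvCnt cs (min n (i + 3)) - pvCnt cs (i - 2)) > ((min n (i + 3) - max 0 (i - 2) : Nat) : Int)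
          then (if i % 2 = 0 then '0' else '1') else (if i % 3 = 0 then '1' else '0'))) := by
  induction m with
  | zero => simp [pvS]
  | succ m ih =>
      have hm' : m < n := hm
      rw [List.range_succ, List.foldl_append, ih (le_of_lt hm'), List.foldl_cons, List.foldl_nil]
      simp only [hD m hm']
      have hS : pvS cs n m + pvE cs n n m = pvS cs n (m + 1) := by
        unfold pvS
        rw [List.range_succ, List.map_append, List.sum_append]
        simp
      rw [hS, S_eq_window cs n hn m hm']
      rw [List.map_append]
      rfl

theorem generate_irreducible_pattern_py_spec : Claim_equal_generate_irreducible_pattern_py := by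
  intro processed _
  unfold Spec_generate_irreducible_pattern_py generate_irreducible_pattern_py
    generate_irreducible_pattern_py_alt
  set cs := processed.toList with hcs
  by_cases h3 : cs.length < 3
  · rw [if_pos h3, if_pos h3]
  · rw [if_neg h3, if_neg h3]
    dsimp only
    rw [replace_eq_rewrite11]
    refine congrArg (fun l => String.ofList (pvRewrite11 l)) ?_
    -- the scatter fold, characterised
    have hB1 : (PySem.List.enumerate cs).foldl (fun (d : List Int) jc =>
        if jc.2 = '1' then
          (d.set (max 0 (jc.1 - 2)).toNat (d.getD (max 0 (jc.1 - 2)).toNat 0 + 1)).set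
            (min ((cs.length : Int)) (jc.1 + 3)).toNat
            ((d.set (max 0 (jc.1 - 2)).toNat (d.getD (max 0 (jc.1 - 2)).toNat 0 + 1)).getD
              (min ((cs.length : Int)) (jc.1 + 3)).toNat 0 - 1)
        else d) (List.replicate (cs.length + 1) (0 : Int))
        = (List.range (cs.length + 1)).map (pvE cs cs.length cs.length) := by
      rw [PySem.List.enumerate_eq_map_pyRange cs ' ', PySem.List.len_eq, PySem.List.pyRange_one]
      have h0 : ((cs.length : Int) - 0).toNat = cs.length := by omega
      rw [h0, List.foldl_map, List.foldl_map]
      rw [PySem.List.foldl_congr_mem (g := fun (d : List Int) (j : Nat) =>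
        if cs.getD j ' ' = '1' then
          let a := j - 2
          let b := min cs.length (j + 3)
          let d1 := d.set a (d.getD a 0 + 1)
          d1.set b (d1.getD b 0 - 1)
        else d)]
      · exact scatter_inv cs cs.length rfl cs.length le_rfl
      · intro d j hj
        have hjlt : j < cs.length := List.mem_range.mp hj
        simp only [zero_add, PySem.List.pyGetD_natCast]
        have h1 : (max 0 ((j : Int) - 2)).toNat = j - 2 := by omega
        have h2 : (min ((cs.length : Int)) ((j : Int) + 3)).toNat = min cs.length (j + 3) := by omega
        rw [h1, h2]
    rw [hB1]
    have hD : ∀ i, i < cs.length →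
        ((List.range (cs.length + 1)).map (pvE cs cs.length cs.length)).getD i 0
          = pvE cs cs.length cs.length i := by
      intro i hi
      rw [List.getD_eq_getElem?_getD]
      simp [Nat.lt_succ_of_lt hi]
    rw [gather_inv cs cs.length rfl _ hD cs.length le_rfl]
    dsimp only
    -- A's quale, as the same map over List.range
    rw [PySem.List.pyRange_one]
    have h0 : ((cs.length : Int) - 0).toNat = cs.length := by omega
    rw [h0, List.foldl_map]
    rw [PySem.List.foldl_congr_mem (g := fun (acc : List Char) (i : Nat) =>
      acc ++ [if 2 * (pvCnt cs (min cs.length (i + 3)) - pvCnt cs (i - 2))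
                  > ((min cs.length (i + 3) - max 0 (i - 2) : Nat) : Int)
              then (if i % 2 = 0 then '0' else '1') else (if i % 3 = 0 then '1' else '0')])]
    · simpa only [List.nil_append] using
        (PySem.List.foldl_append_singleton_eq_map
          (f := fun (i : Nat) =>
            if 2 * (pvCnt cs (min cs.length (i + 3)) - pvCnt cs (i - 2))
                > ((min cs.length (i + 3) - max 0 (i - 2) : Nat) : Int)
            then (if i % 2 = 0 then '0' else '1') else (if i % 3 = 0 then '1' else '0'))
          (l := List.range cs.length) (acc := []))
    · intro acc i hi
      have hilt : i < cs.length := List.mem_range.mp hi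
      simp only [zero_add]
      have hs0 : (0 : Int) ≤ max 0 ((i : Int) - 2) := le_max_left _ _
      have he0 : (0 : Int) ≤ min ((cs.length : Int)) ((i : Int) + 3) := by omega
      have hsn : (max 0 ((i : Int) - 2)).toNat = i - 2 := by omega
      have hen : (min ((cs.length : Int)) ((i : Int) + 3)).toNat = min cs.length (i + 3) := by omega
      rw [PySem.List.slice_toNat cs hs0 he0, hsn, hen]
      have hse : i - 2 ≤ min cs.length (i + 3) := by omega
      have hcount : (((cs.drop (i - 2)).take (min cs.length (i + 3) - (i - 2))).count '1' : Int)
          = pvCnt cs (min cs.length (i + 3)) - pvCnt cs (i - 2) := by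
        have hdecomp : (cs.take (min cs.length (i + 3))).count '1'
            = (cs.take (i - 2)).count '1'
              + ((cs.drop (i - 2)).take (min cs.length (i + 3) - (i - 2))).count '1' := by
          conv_lhs => rw [show min cs.length (i + 3) = (i - 2) + (min cs.length (i + 3) - (i - 2)) by omega,
            List.take_add, List.count_append]
        unfold pvCnt
        rw [hdecomp]; push_cast; ring
      have hlen : (((cs.drop (i - 2)).take (min cs.length (i + 3) - (i - 2))).length : Int)
          = ((min cs.length (i + 3) - max 0 (i - 2) : Nat) : Int) := by
        simp only [List.length_take, List.length_drop]
        omega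
      rw [hcount, hlen]
      have hmod2 : (PySem.Int.mod (i : Int) 2 = 0) ↔ (i % 2 = 0) := by
        rw [PySem.Int.mod_eq_emod_of_pos (by omega)]
        omega
      have hmod3 : (PySem.Int.mod (i : Int) 3 = 0) ↔ (i % 3 = 0) := by
        rw [PySem.Int.mod_eq_emod_of_pos (by omega)]
        omega
      simp only [hmod2, hmod3]
      split <;> rfl
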